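-- pv_equiv track=rewrite | github.com/lucidsoftware/lucid-programming-competition-2021 | problems/ScariestPath/generate_tests.py | solution
-- ===== SOURCE A (Python) =====
-- def solution(scariness, adjacency):
--     n = len(scariness)
--     idxs = [i[0] for i in sorted(enumerate(scariness), key = lambda x: -x[1])]
--     tot = 0
--     seen = set()
--     for i in range(n):
--         idx = idxs[i]
--         tot += scariness[idx]
--         for j in range(n):
--             if adjacency[idx][j] and j in seen:
--                 tot += scariness[j]
--         seen.add(idx)
--     return tot
-- ===== SOURCE B (Python) =====
-- def solution(scariness, adjacency):
--     # No sorting, no seen-set: node j's scariness is counted once outright,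
--     # and once more for every edge (i, j) whose source i comes later than j
--     # in descending-scariness order, a relation decided directly by comparing
--     # (scariness, index) pairs.
--     tot = sum(scariness)
--     n = len(scariness)
--     for i in range(n):
--         si = scariness[i]
--         row = adjacency[i]
--         for j in range(n):
--             sj = scariness[j]
--             if row[j] and (sj > si or (sj == si and j < i)):
--                 tot += sj
--     return tot
-- ===== Notes on version B (the rewrite author's own statement) =====
-- stated objective: alternative
-- what changed: B eliminates A's sort and incremental seen-set entirely: it decides 'i comes later than j in descending-scariness order' directly by comparing (scariness, index) pairs (sj > si or sj == si and j < i) in one static double pass, with tot initialised to sum(scariness).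
import Mathlib
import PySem

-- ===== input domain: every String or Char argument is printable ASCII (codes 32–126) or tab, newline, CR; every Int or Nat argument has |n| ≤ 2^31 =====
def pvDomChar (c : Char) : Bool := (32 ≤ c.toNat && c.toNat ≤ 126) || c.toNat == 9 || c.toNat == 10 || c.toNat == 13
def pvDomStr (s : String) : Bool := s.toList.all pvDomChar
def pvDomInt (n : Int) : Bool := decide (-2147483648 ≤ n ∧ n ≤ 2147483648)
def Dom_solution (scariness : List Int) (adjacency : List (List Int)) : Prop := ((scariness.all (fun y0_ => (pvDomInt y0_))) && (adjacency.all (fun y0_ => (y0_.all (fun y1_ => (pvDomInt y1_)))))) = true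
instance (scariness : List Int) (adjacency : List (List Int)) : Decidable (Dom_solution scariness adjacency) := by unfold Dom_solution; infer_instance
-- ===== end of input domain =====

-- B removes A's sort and seen-set: the descending-scariness order is decided directly by
-- comparing (scariness, index) pairs in one static double pass (objective: alternative).

-- ===== PORT A =====
def solution (scariness : List Int) (adjacency : List (List Int)) : Int :=
  let n : Int := scariness.length
  let idxs : List Int :=
    (PySem.List.sorted (PySem.List.enumerate scariness 0) (fun x => -x.2) false).map (·.1)
  let res :=
    (PySem.List.pyRange 0 n 1).foldl (fun (st : Int × PySem.Set Int) i =>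
      let idx := PySem.List.pyGetD idxs i 0
      let tot := st.1 + PySem.List.pyGetD scariness idx 0
      let tot :=
        (PySem.List.pyRange 0 n 1).foldl (fun t j =>
          if PySem.List.pyGetD (PySem.List.pyGetD adjacency idx []) j 0 ≠ 0 ∧ j ∈ st.2 then
            t + PySem.List.pyGetD scariness j 0
          else t) tot
      (tot, PySem.Set.add st.2 idx)) ((0 : Int), (PySem.Set.empty : PySem.Set Int))
  res.1

-- ===== PORT B =====
def solution_alt (scariness : List Int) (adjacency : List (List Int)) : Int :=
  let tot : Int := scariness.sum
  let n : Int := scariness.length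
  (PySem.List.pyRange 0 n 1).foldl (fun tot i =>
    let si := PySem.List.pyGetD scariness i 0
    let row := PySem.List.pyGetD adjacency i []
    (PySem.List.pyRange 0 n 1).foldl (fun tot j =>
      let sj := PySem.List.pyGetD scariness j 0
      if PySem.List.pyGetD row j 0 ≠ 0 ∧ (si < sj ∨ (sj = si ∧ j < i)) then tot + sj
      else tot) tot) tot

-- ===== PRECONDITION & SPEC =====
-- Pre_ excludes exactly the inputs where A raises IndexError: adjacency (or one of its
-- first n rows) shorter than n = len(scariness).
def Pre_solution (scariness : List Int) (adjacency : List (List Int)) : Prop :=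
  scariness.length ≤ adjacency.length ∧
    ∀ row ∈ adjacency.take scariness.length, scariness.length ≤ row.length
instance (scariness : List Int) (adjacency : List (List Int)) : Decidable (Pre_solution scariness adjacency) := by unfold Pre_solution; infer_instance

def pvWitness_solution : List Int × List (List Int) :=
  ([3, 1, 2], [[0, 1, 0], [1, 0, 1], [0, 1, 0]])

def Spec_solution (scariness : List Int) (adjacency : List (List Int)) (out : Int) : Prop := out = solution_alt scariness adjacency
instance (scariness : List Int) (adjacency : List (List Int)) (out : Int) : Decidable (Spec_solution scariness adjacency out) := by unfold Spec_solution; infer_instance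

-- ===== CLAIM (what is proved, stated in full; the proofs are below) =====
def Claim_equal_solution : Prop := ∀ (scariness : List Int) (adjacency : List (List Int)), Dom_solution scariness adjacency → Pre_solution scariness adjacency → Spec_solution scariness adjacency (solution scariness adjacency)

-- ===== LEMMAS AND PROOFS =====

-- "a comes strictly before b in A's descending-scariness, index-tiebroken order"
def pvBefore (sc : List Int) (a b : Int) : Prop :=
  PySem.List.pyGetD sc b 0 < PySem.List.pyGetD sc a 0 ∨
    (PySem.List.pyGetD sc a 0 = PySem.List.pyGetD sc b 0 ∧ a < b)

def pvIdxs (sc : List Int) : List Int :=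
  (PySem.List.sorted (PySem.List.enumerate sc 0) (fun x => -x.2) false).map (·.1)

def pvS (sc : List Int) (adj : List (List Int)) (v : Int) : Int :=
  ((PySem.List.pyRange 0 (sc.length : Int) 1).map (fun j =>
     if PySem.List.pyGetD (PySem.List.pyGetD adj v []) j 0 ≠ 0 ∧
          (PySem.List.pyGetD sc v 0 < PySem.List.pyGetD sc j 0 ∨
            (PySem.List.pyGetD sc j 0 = PySem.List.pyGetD sc v 0 ∧ j < v))
     then PySem.List.pyGetD sc j 0 else 0)).sum

theorem pvIdxs_perm (sc : List Int) : (pvIdxs sc).Perm (PySem.List.pyRange 0 (sc.length : Int) 1) := by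
  have h := (PySem.List.sorted_perm (PySem.List.enumerate sc 0) (fun x : Int × Int => -x.2) false).map (·.1)
  simpa [pvIdxs, PySem.List.map_fst_enumerate] using h

theorem pvIdxs_nodup (sc : List Int) : (pvIdxs sc).Nodup :=
  (pvIdxs_perm sc).nodup_iff.mpr (PySem.List.nodup_pyRange_one 0 (sc.length : Int))

theorem pvIdxs_mem (sc : List Int) (v : Int) : v ∈ pvIdxs sc ↔ 0 ≤ v ∧ v < (sc.length : Int) := by
  rw [(pvIdxs_perm sc).mem_iff, PySem.List.mem_pyRange_one]

theorem pvIdxs_length (sc : List Int) : (pvIdxs sc).length = sc.length := by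
  have := (pvIdxs_perm sc).length_eq
  simpa [PySem.List.length_pyRange_one] using this

-- stability of the insertion sort: inserting an element whose index exceeds every index in
-- acc preserves the strict (descending value, ascending index) pairwise order
theorem pvInsert_pairwise (x : Int × Int) (acc : List (Int × Int))
    (h : acc.Pairwise (fun p q => q.2 < p.2 ∨ (p.2 = q.2 ∧ p.1 < q.1)))
    (hidx : ∀ p ∈ acc, p.1 < x.1) :
    (PySem.List.insertBy (fun a b => decide (-a.2 < -b.2)) x acc).Pairwise
      (fun p q => q.2 < p.2 ∨ (p.2 = q.2 ∧ p.1 < q.1)) := by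
  induction acc with
  | nil => simp [PySem.List.insertBy]
  | cons y ys ih =>
    by_cases hb : (-x.2 : Int) < -y.2
    · have hxy : y.2 < x.2 := by omega
      rw [show PySem.List.insertBy (fun a b => decide (-a.2 < -b.2)) x (y :: ys)
          = x :: y :: ys by simp [PySem.List.insertBy, hb]]
      refine List.Pairwise.cons ?_ h
      intro z hz
      rcases List.mem_cons.mp hz with hz | hz
      · subst hz; left; omega
      · have := (List.pairwise_cons.mp h).1 z hz
        left; omega
    · rw [show PySem.List.insertBy (fun a b => decide (-a.2 < -b.2)) x (y :: ys)
          = y :: PySem.List.insertBy (fun a b => decide (-a.2 < -b.2)) x ys by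
        simp [PySem.List.insertBy, hb]]
      refine List.Pairwise.cons ?_ (ih (List.pairwise_cons.mp h).2
        (fun p hp => hidx p (by simp [hp])))
      intro z hz
      rcases (PySem.List.insertBy_mem_iff _ _ _ _).mp hz with hz | hz
      · rw [hz]
        have hy : y.1 < x.1 := hidx y (by simp)
        rcases lt_or_eq_of_le (show x.2 ≤ y.2 by omega) with hlt | heq
        · left; exact hlt
        · right; exact ⟨heq.symm, hy⟩
      · exact (List.pairwise_cons.mp h).1 z hz

theorem pvFoldl_insert_pairwise (l : List Int) :
    ∀ (s : Int) (acc : List (Int × Int)),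
    acc.Pairwise (fun p q => q.2 < p.2 ∨ (p.2 = q.2 ∧ p.1 < q.1)) →
    (∀ p ∈ acc, p.1 < s) →
    ((PySem.List.enumerate l s).foldl
      (fun acc x => PySem.List.insertBy (fun a b => decide (-a.2 < -b.2)) x acc) acc).Pairwise
      (fun p q => q.2 < p.2 ∨ (p.2 = q.2 ∧ p.1 < q.1)) := by
  induction l with
  | nil => intro s acc h _; simpa [PySem.List.enumerate_nil] using h
  | cons v l ih =>
    intro s acc h hidx
    rw [PySem.List.enumerate_cons, List.foldl_cons]
    refine ih (s + 1) _ (pvInsert_pairwise (s, v) acc h hidx) ?_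
    intro p hp
    rcases (PySem.List.insertBy_mem_iff _ _ _ _).mp hp with hp | hp
    · subst hp; omega
    · have := hidx p hp; omega

theorem pvSorted_elem (sc : List Int) (p : Int × Int)
    (hp : p ∈ PySem.List.sorted (PySem.List.enumerate sc 0) (fun x => -x.2) false) :
    p.2 = PySem.List.pyGetD sc p.1 0 := by
  rw [PySem.List.mem_sorted, PySem.List.mem_enumerate_iff] at hp
  obtain ⟨k, hk, rfl⟩ := hp
  simp [PySem.List.pyGetD_natCast, List.getElem?_eq_getElem hk]

theorem pvIdxs_pairwise (sc : List Int) : (pvIdxs sc).Pairwise (pvBefore sc) := by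
  have h0 := pvFoldl_insert_pairwise sc 0 [] (by simp) (by simp)
  rw [← PySem.List.sorted_eq_foldl_insertBy (PySem.List.enumerate sc 0)
      (fun x : Int × Int => -x.2)] at h0
  unfold pvIdxs
  rw [List.pairwise_map]
  refine h0.imp_of_mem ?_
  intro p q hp hq hpq
  have ep := pvSorted_elem sc p hp
  have eq' := pvSorted_elem sc q hq
  unfold pvBefore
  rw [← ep, ← eq']
  exact hpq

theorem pvBefore_asymm (sc : List Int) (a b : Int) (h : pvBefore sc a b) : ¬ pvBefore sc b a := by
  unfold pvBefore at *; omega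

theorem pvOrder (sc : List Int) (i j : Int) (hi : i ∈ pvIdxs sc) (hj : j ∈ pvIdxs sc) :
    (pvIdxs sc).idxOf j < (pvIdxs sc).idxOf i ↔ pvBefore sc j i := by
  have hp := pvIdxs_pairwise sc
  have hja : (pvIdxs sc).idxOf j < (pvIdxs sc).length := List.idxOf_lt_length_iff.mpr hj
  have hia : (pvIdxs sc).idxOf i < (pvIdxs sc).length := List.idxOf_lt_length_iff.mpr hi
  have hgj : (pvIdxs sc)[(pvIdxs sc).idxOf j] = j := List.getElem_idxOf hja
  have hgi : (pvIdxs sc)[(pvIdxs sc).idxOf i] = i := List.getElem_idxOf hia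
  constructor
  · intro hlt
    have := (List.pairwise_iff_getElem.mp hp) _ _ hja hia hlt
    rwa [hgj, hgi] at this
  · intro hb
    rcases Nat.lt_trichotomy ((pvIdxs sc).idxOf j) ((pvIdxs sc).idxOf i) with h | h | h
    · exact h
    · exfalso
      simp only [h] at hgj
      have : j = i := hgj.symm.trans hgi
      subst this
      unfold pvBefore at hb; omega
    · exfalso
      have := (List.pairwise_iff_getElem.mp hp) _ _ hia hja h
      rw [hgi, hgj] at this
      exact pvBefore_asymm sc j i hb this

theorem pvFoldlIfAdd (l : List Int) (p : Int → Prop) [DecidablePred p] (g : Int → Int) (a : Int) :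
    l.foldl (fun acc x => if p x then acc + g x else acc) a
      = a + (l.map (fun x => if p x then g x else 0)).sum := by
  induction l generalizing a with
  | nil => simp
  | cons x l ih => by_cases h : p x <;> simp [ih, h]; ring

theorem pvMemPreIff (pre rest : List Int) (v j : Int)
    (hn : (pre ++ v :: rest).Nodup) :
    j ∈ pre ↔ (pre ++ v :: rest).idxOf j < (pre ++ v :: rest).idxOf v := by
  have hvpre : v ∉ pre := by
    intro h; exact (List.disjoint_of_nodup_append hn) h (by simp)
  have hv : (pre ++ v :: rest).idxOf v = pre.length := by
    rw [List.idxOf_append, if_neg hvpre, List.idxOf_cons_self]; omega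
  rw [hv, List.idxOf_append]
  constructor
  · intro h; rw [if_pos h]; exact List.idxOf_lt_length_iff.mpr h
  · intro h; by_contra hnp
    rw [if_neg hnp] at h; omega

theorem pvSetAdd (pre : List Int) (v : Int) :
    PySem.Set.add (PySem.Set.ofList pre) v = PySem.Set.ofList (pre ++ [v]) := by
  simp [PySem.Set.ofList_eq_foldl, List.foldl_append]

theorem pvFoldA (sc : List Int) (adj : List (List Int)) :
    ∀ (rest pre : List Int) (t : Int), pre ++ rest = pvIdxs sc →
    rest.foldl (fun (st : Int × PySem.Set Int) idx =>
        ((PySem.List.pyRange 0 (sc.length : Int) 1).foldl (fun tj j =>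
            if PySem.List.pyGetD (PySem.List.pyGetD adj idx []) j 0 ≠ 0 ∧ j ∈ st.2 then
              tj + PySem.List.pyGetD sc j 0
            else tj) (st.1 + PySem.List.pyGetD sc idx 0),
          PySem.Set.add st.2 idx)) (t, PySem.Set.ofList pre)
      = (t + (rest.map (fun v => PySem.List.pyGetD sc v 0 + pvS sc adj v)).sum,
          PySem.Set.ofList (pre ++ rest)) := by
  intro rest
  induction rest with
  | nil => intro pre t _; simp
  | cons v rest ih =>
    intro pre t hsplit
    rw [List.foldl_cons]
    rw [pvFoldlIfAdd _ (fun j => PySem.List.pyGetD (PySem.List.pyGetD adj v []) j 0 ≠ 0 ∧ j ∈ PySem.Set.ofList pre)]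
    have hvmem : v ∈ pvIdxs sc := by rw [← hsplit]; simp
    have hmap : ((PySem.List.pyRange 0 (sc.length : Int) 1).map (fun j =>
        if PySem.List.pyGetD (PySem.List.pyGetD adj v []) j 0 ≠ 0 ∧ j ∈ PySem.Set.ofList pre then
          PySem.List.pyGetD sc j 0 else 0))
        = ((PySem.List.pyRange 0 (sc.length : Int) 1).map (fun j =>
        if PySem.List.pyGetD (PySem.List.pyGetD adj v []) j 0 ≠ 0 ∧
            (PySem.List.pyGetD sc v 0 < PySem.List.pyGetD sc j 0 ∨
              (PySem.List.pyGetD sc j 0 = PySem.List.pyGetD sc v 0 ∧ j < v)) then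
          PySem.List.pyGetD sc j 0 else 0)) := by
      apply List.map_congr_left
      intro j hj
      have hjmem : j ∈ pvIdxs sc := by
        rw [pvIdxs_mem]; exact (PySem.List.mem_pyRange_one).mp hj
      have hiff : j ∈ pre ↔ (PySem.List.pyGetD sc v 0 < PySem.List.pyGetD sc j 0 ∨
          (PySem.List.pyGetD sc j 0 = PySem.List.pyGetD sc v 0 ∧ j < v)) := by
        rw [show (PySem.List.pyGetD sc v 0 < PySem.List.pyGetD sc j 0 ∨
          (PySem.List.pyGetD sc j 0 = PySem.List.pyGetD sc v 0 ∧ j < v)) = pvBefore sc j v from rfl]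
        rw [← pvOrder sc v j hvmem hjmem]
        rw [← hsplit] at hjmem ⊢
        exact pvMemPreIff pre rest v j (hsplit ▸ pvIdxs_nodup sc)
      simp only [PySem.Set.mem_ofList]
      exact if_congr (and_congr_right fun _ => hiff) rfl rfl
    rw [hmap, pvSetAdd]
    have hfold := ih (pre ++ [v]) (t + PySem.List.pyGetD sc v 0 + pvS sc adj v) (by simpa using hsplit)
    rw [show pre ++ [v] ++ rest = pre ++ v :: rest by simp] at hfold
    have h2 : (t + PySem.List.pyGetD sc v 0 + pvS sc adj v +
        (List.map (fun v => PySem.List.pyGetD sc v 0 + pvS sc adj v) rest).sum,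
        PySem.Set.ofList (pre ++ v :: rest))
      = (t + (List.map (fun v => PySem.List.pyGetD sc v 0 + pvS sc adj v) (v :: rest)).sum,
        PySem.Set.ofList (pre ++ v :: rest)) := by
      simp only [List.map_cons, List.sum_cons, Prod.mk.injEq, and_true]
      ring
    exact hfold.trans h2

def pvStepA (sc : List Int) (adj : List (List Int)) (st : Int × PySem.Set Int) (idx : Int) :
    Int × PySem.Set Int :=
  ((PySem.List.pyRange 0 (sc.length : Int) 1).foldl (fun tj j =>
      if PySem.List.pyGetD (PySem.List.pyGetD adj idx []) j 0 ≠ 0 ∧ j ∈ st.2 then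
        tj + PySem.List.pyGetD sc j 0
      else tj) (st.1 + PySem.List.pyGetD sc idx 0),
    PySem.Set.add st.2 idx)

theorem pvFoldA' (sc : List Int) (adj : List (List Int)) :
    (pvIdxs sc).foldl (pvStepA sc adj) ((0 : Int), (PySem.Set.empty : PySem.Set Int))
      = (0 + ((pvIdxs sc).map (fun v => PySem.List.pyGetD sc v 0 + pvS sc adj v)).sum,
          PySem.Set.ofList ([] ++ pvIdxs sc)) :=
  pvFoldA sc adj (pvIdxs sc) [] 0 (by simp)

theorem pvA_eq (sc : List Int) (adj : List (List Int)) :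
    solution sc adj = ((pvIdxs sc).map (fun v => PySem.List.pyGetD sc v 0 + pvS sc adj v)).sum := by
  have e1 : ((PySem.List.pyRange 0 ((pvIdxs sc).length : Int) 1).foldl
        (fun st i => pvStepA sc adj st (PySem.List.pyGetD (pvIdxs sc) i 0))
        ((0 : Int), (PySem.Set.empty : PySem.Set Int)))
      = (pvIdxs sc).foldl (pvStepA sc adj) ((0 : Int), (PySem.Set.empty : PySem.Set Int)) :=
    PySem.List.foldl_pyRange_zero_pyGetD' (pvIdxs sc) 0 (pvStepA sc adj) _
  have e0 : solution sc adj
      = ((PySem.List.pyRange 0 ((pvIdxs sc).length : Int) 1).foldl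
        (fun st i => pvStepA sc adj st (PySem.List.pyGetD (pvIdxs sc) i 0))
        ((0 : Int), (PySem.Set.empty : PySem.Set Int))).1 := by
    rw [pvIdxs_length]; rfl
  rw [e0, e1, pvFoldA']
  simp

theorem pvB_eq (sc : List Int) (adj : List (List Int)) :
    solution_alt sc adj
      = sc.sum + ((PySem.List.pyRange 0 (sc.length : Int) 1).map (pvS sc adj)).sum := by
  have e0 : solution_alt sc adj
      = (PySem.List.pyRange 0 (sc.length : Int) 1).foldl (fun tot i =>
          (PySem.List.pyRange 0 (sc.length : Int) 1).foldl (fun tot j =>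
            if PySem.List.pyGetD (PySem.List.pyGetD adj i []) j 0 ≠ 0 ∧
                (PySem.List.pyGetD sc i 0 < PySem.List.pyGetD sc j 0 ∨
                  (PySem.List.pyGetD sc j 0 = PySem.List.pyGetD sc i 0 ∧ j < i)) then
              tot + PySem.List.pyGetD sc j 0
            else tot) tot) sc.sum := rfl
  rw [e0]
  rw [PySem.List.foldl_congr_mem _ _ (fun tot i => tot + pvS sc adj i) _ ?_]
  · exact PySem.List.foldl_add _ (pvS sc adj) sc.sum
  · intro tot i _
    rw [pvFoldlIfAdd _ (fun j => PySem.List.pyGetD (PySem.List.pyGetD adj i []) j 0 ≠ 0 ∧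
        (PySem.List.pyGetD sc i 0 < PySem.List.pyGetD sc j 0 ∨
          (PySem.List.pyGetD sc j 0 = PySem.List.pyGetD sc i 0 ∧ j < i)))]
    unfold pvS
    rfl

theorem pvMain (sc : List Int) (adj : List (List Int)) :
    solution sc adj = solution_alt sc adj := by
  rw [pvA_eq, pvB_eq, PySem.List.sum_map_add_int]
  congr 1
  · rw [((pvIdxs_perm sc).map (fun v => PySem.List.pyGetD sc v 0)).sum_eq]
    exact congrArg List.sum (PySem.List.map_pyGetD_pyRange_zero' sc 0)
  · exact ((pvIdxs_perm sc).map (pvS sc adj)).sum_eq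

-- ===== VERDICT (by name: the statement is the Claim_ definition above) =====
theorem solution_spec : Claim_equal_solution := by
  intro sc adj _ _
  show solution sc adj = solution_alt sc adj
  exact (pvMain sc adj)
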